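-- pv_equiv track=rewrite | github.com/DNYoussef/AIVillage | src/production/rag/rag_system/utils/graph_utils.py | distance_sensitive_linearization
-- ===== SOURCE A (Python) =====
-- def distance_sensitive_linearization(
--     graph: dict[str, list[str]], anchor: str
-- ) -> list[str]:
--     distances = {anchor: 0}
--     queue = [(anchor, 0)]
--     linearized = []
--
--     while queue:
--         node, dist = queue.pop(0)
--         linearized.append(node)
--         for neighbor in graph.get(node, []):
--             if neighbor not in distances:
--                 distances[neighbor] = dist + 1
--                 queue.append((neighbor, dist + 1))
--
--     return sorted(linearized, key=lambda x: distances[x], reverse=True)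
-- ===== SOURCE B (Python) =====
-- def distance_sensitive_linearization(graph, anchor):
--     visited = {anchor}
--     levels = []
--     cur = [anchor]
--     while cur:
--         levels.append(cur)
--         nxt = []
--         for node in cur:
--             for nb in graph.get(node, []):
--                 if nb not in visited:
--                     visited.add(nb)
--                     nxt.append(nb)
--         cur = nxt
--     out = []
--     for lvl in reversed(levels):
--         out.extend(lvl)
--     return out
-- ===== Notes on version B (the rewrite author's own statement) =====
-- stated objective: alternative
-- what changed: Level-by-level BFS that buckets nodes by distance as they are discovered and emits the levels back-to-front, replacing A's flat FIFO queue, distances dict and final stable descending sort.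
import Mathlib
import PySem

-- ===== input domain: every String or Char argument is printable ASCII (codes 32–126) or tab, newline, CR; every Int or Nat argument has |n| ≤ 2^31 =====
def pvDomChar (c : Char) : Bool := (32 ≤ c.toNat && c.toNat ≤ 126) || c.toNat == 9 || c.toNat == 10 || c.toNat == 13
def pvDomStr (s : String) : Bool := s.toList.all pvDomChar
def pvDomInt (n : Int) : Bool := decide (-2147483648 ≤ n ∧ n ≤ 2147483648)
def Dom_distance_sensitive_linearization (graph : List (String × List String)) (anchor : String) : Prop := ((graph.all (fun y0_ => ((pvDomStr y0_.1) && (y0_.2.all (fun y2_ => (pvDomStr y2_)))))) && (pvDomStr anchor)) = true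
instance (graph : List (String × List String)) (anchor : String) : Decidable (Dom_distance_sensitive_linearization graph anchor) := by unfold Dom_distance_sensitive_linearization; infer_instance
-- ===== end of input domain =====

-- B replaces A's flat FIFO queue + distances dict + final stable descending sort by a
-- level-by-level BFS that buckets nodes by distance and emits the levels back-to-front.

-- fuel bound shared by the two fueled while-loops: the number of queue pops (resp. BFS
-- levels) is at most 1 + the total number of adjacency-list entries (proved below)
def dslFuel (graph : List (String × List String)) : Nat :=
  (graph.map (fun p => p.2)).flatten.length + 3

-- ===== PORT A =====
-- while queue: node,dist = queue.pop(0); linearized.append(node); for neighbor in graph.get(node,[]): ...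
def dslA_loop (g : List (String × List String)) :
    Nat → List (String × Int) → PySem.Dict String Int → List String →
    Option (List String × PySem.Dict String Int)
  | 0, _, _, _ => none
  | _ + 1, [], D, lin => some (lin, D)
  | f + 1, (node, dist) :: rest, D, lin =>
      let st := ((PySem.Dict.mk g).getD node []).foldl
        (fun (st : PySem.Dict String Int × List (String × Int)) nb =>
          if st.1.contains nb then st else (st.1.insert nb (dist + 1), st.2 ++ [(nb, dist + 1)]))
        (D, rest)
      dslA_loop g f st.2 st.1 (lin ++ [node])

def distance_sensitive_linearization (graph : List (String × List String)) (anchor : String) : List String :=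
  match dslA_loop graph (dslFuel graph) [(anchor, 0)] (PySem.Dict.empty.insert anchor 0) [] with
  | some (lin, distances) => PySem.List.sorted lin (fun x => distances.getD x 0) true
  | none => []  -- unreachable: dslFuel bounds the pop count (lemma dslA_term below)

-- ===== PORT B =====
-- nxt = []; for node in cur: for nb in graph.get(node,[]): if nb not in visited: visited.add(nb); nxt.append(nb)
def dslB_step (g : List (String × List String)) (visited : PySem.Set String) (cur : List String) :
    PySem.Set String × List String :=
  cur.foldl (fun st node =>
    ((PySem.Dict.mk g).getD node []).foldl
      (fun (st : PySem.Set String × List String) nb =>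
        if PySem.Set.contains st.1 nb then st else (PySem.Set.add st.1 nb, st.2 ++ [nb])) st)
    (visited, [])

-- while cur: levels.append(cur); cur = nxt
def dslB_loop (g : List (String × List String)) :
    Nat → PySem.Set String → List String → List (List String) → List (List String)
  | 0, _, _, levels => levels
  | f + 1, visited, cur, levels =>
      if cur = [] then levels
      else
        let st := dslB_step g visited cur
        dslB_loop g f st.1 st.2 (levels ++ [cur])

def distance_sensitive_linearization_alt (graph : List (String × List String)) (anchor : String) : List String :=
  let levels := dslB_loop graph (dslFuel graph) (PySem.Set.add PySem.Set.empty anchor) [anchor] []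
  levels.reverse.foldl (fun out lvl => out ++ lvl) []

-- ===== PRECONDITION & SPEC =====
def Spec_distance_sensitive_linearization (graph : List (String × List String)) (anchor : String) (out : List String) : Prop := out = distance_sensitive_linearization_alt graph anchor
instance (graph : List (String × List String)) (anchor : String) (out : List String) : Decidable (Spec_distance_sensitive_linearization graph anchor out) := by unfold Spec_distance_sensitive_linearization; infer_instance

-- ===== CLAIM (what is proved, stated in full; the proofs are below) =====
def Claim_equal_distance_sensitive_linearization : Prop := ∀ (graph : List (String × List String)) (anchor : String), Dom_distance_sensitive_linearization graph anchor → Spec_distance_sensitive_linearization graph anchor (distance_sensitive_linearization graph anchor)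

-- ===== LEMMAS AND PROOFS =====

-- the neighbour list of a node, and the list of all adjacency entries
def dslAdj (g : List (String × List String)) (n : String) : List String :=
  (PySem.Dict.mk g).getD n []
def dslFlat (g : List (String × List String)) : List String :=
  (g.map (fun p => p.2)).flatten

-- the not-yet-visited members of a neighbour list, deduplicated, in order
def dslFresh : List String → List String → List String
  | _, [] => []
  | mem, nb :: t => if nb ∈ mem then dslFresh mem t else nb :: dslFresh (mem ++ [nb]) t

-- one whole BFS level's worth of fresh discoveries
def dslLvl (g : List (String × List String)) : List String → List String → List String
  | _, [] => []
  | mem, n :: t =>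
      dslFresh mem (dslAdj g n) ++ dslLvl g (mem ++ dslFresh mem (dslAdj g n)) t

-- the future full levels of the BFS, given visited set `mem`, the unprocessed remainder
-- `rest` of the current level, and the already-discovered prefix `nxt` of the next level
def dslFut (g : List (String × List String)) : Nat → List String → List String → List String → List (List String)
  | 0, _, _, _ => []
  | f + 1, mem, rest, nxt =>
      let nl := nxt ++ dslLvl g mem rest
      if nl = [] then [] else nl :: dslFut g f (mem ++ dslLvl g mem rest) nl []

-- index of the first level containing x
def dslIdx (x : String) : List (List String) → Option Nat
  | [] => none
  | l :: t => if x ∈ l then some 0 else (dslIdx x t).map (· + 1)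

theorem dslFut_unfold (g : List (String × List String)) (f : Nat) (mem rest nxt : List String) :
    dslFut g (f + 1) mem rest nxt
      = if nxt ++ dslLvl g mem rest = [] then []
        else (nxt ++ dslLvl g mem rest) :: dslFut g f (mem ++ dslLvl g mem rest) (nxt ++ dslLvl g mem rest) [] := rfl

-- universe of possible visited nodes, and the count of still-unvisited ones
def dslUni (g : List (String × List String)) (anchor : String) : List String :=
  (anchor :: dslFlat g).dedup
def dslS (g : List (String × List String)) (anchor : String) (mem : List String) : Nat :=
  ((dslUni g anchor).filter (fun x => x ∉ mem)).length

-- ---- basic dict lemmas ----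
theorem dsl_keys_insert_fresh (D : PySem.Dict String Int) (k : String) (v : Int)
    (h : D.contains k = false) : (D.insert k v).keys = D.keys ++ [k] := by
  simp [PySem.Dict.insert, h, PySem.Dict.keys]

theorem dsl_get?_foldl_insert_const (l : List String) (v : Int) (D : PySem.Dict String Int) (x : String) :
    (l.foldl (fun D k => D.insert k v) D).get? x = if x ∈ l then some v else D.get? x := by
  induction l generalizing D with
  | nil => simp
  | cons k t ih =>
    simp only [List.foldl_cons, ih, List.mem_cons]
    by_cases hxt : x ∈ t
    · simp [hxt]
    · by_cases hxk : x = k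
      · subst hxk; simp [hxt, PySem.Dict.get?_insert_self]
      · simp [hxt, hxk, PySem.Dict.get?_insert_of_ne _ _ hxk]

theorem dsl_keys_foldl_insert_const (l : List String) (v : Int) (D : PySem.Dict String Int)
    (hfr : ∀ x ∈ l, x ∉ D.keys) (hnd : l.Nodup) :
    (l.foldl (fun D k => D.insert k v) D).keys = D.keys ++ l := by
  induction l generalizing D with
  | nil => simp
  | cons k t ih =>
    have hc : D.contains k = false := by
      have := hfr k (by simp)
      simpa [PySem.Dict.contains_eq_decide_mem_keys] using this
    have hk : (D.insert k v).keys = D.keys ++ [k] := dsl_keys_insert_fresh D k v hc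
    simp only [List.foldl_cons]
    rw [ih]
    · simp [hk]
    · intro x hx
      rw [hk]
      simp only [List.mem_append, List.mem_singleton]
      rintro (h1 | h2)
      · exact hfr x (by simp [hx]) h1
      · subst h2; exact (List.nodup_cons.mp hnd).1 hx
    · exact (List.nodup_cons.mp hnd).2

-- ---- dslFresh lemmas ----
theorem dslFresh_mem {mem l : List String} {x : String} (h : x ∈ dslFresh mem l) :
    x ∈ l ∧ x ∉ mem := by
  induction l generalizing mem with
  | nil => simp [dslFresh] at h
  | cons nb t ih =>
    by_cases hm : nb ∈ mem
    · simp only [dslFresh, if_pos hm] at h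
      have := ih h; exact ⟨by simp [this.1], this.2⟩
    · simp only [dslFresh, if_neg hm, List.mem_cons] at h
      rcases h with h | h
      · subst h; exact ⟨by simp, hm⟩
      · have := ih h
        refine ⟨by simp [this.1], fun hx => this.2 (by simp [hx])⟩

theorem dslFresh_nodup (mem l : List String) : (dslFresh mem l).Nodup := by
  induction l generalizing mem with
  | nil => simp [dslFresh]
  | cons nb t ih =>
    by_cases hm : nb ∈ mem
    · simpa [dslFresh, hm] using ih mem
    · simp only [dslFresh, if_neg hm, List.nodup_cons]
      refine ⟨fun hnb => ?_, ih (mem ++ [nb])⟩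
      exact (dslFresh_mem hnb).2 (by simp)

theorem dslAdj_subset (g : List (String × List String)) (n : String) {x : String}
    (h : x ∈ dslAdj g n) : x ∈ dslFlat g := by
  unfold dslAdj PySem.Dict.getD PySem.Dict.get? at h
  cases hf : List.find? (fun p => p.1 == n) (PySem.Dict.mk g).items with
  | none => rw [hf] at h; simp at h
  | some p =>
    rw [hf] at h
    simp only [Option.map_some, Option.getD_some] at h
    have hp : p ∈ g := List.mem_of_find?_eq_some hf
    unfold dslFlat
    exact List.mem_flatten.mpr ⟨p.2, List.mem_map.mpr ⟨p, hp, rfl⟩, h⟩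

-- ---- the two inner neighbour folds compute dslFresh ----
theorem dsl_foldA_eq (nbrs : List String)
    (D : PySem.Dict String Int) (q : List (String × Int)) (d : Int) :
    nbrs.foldl
      (fun (st : PySem.Dict String Int × List (String × Int)) nb =>
        if st.1.contains nb then st else (st.1.insert nb (d + 1), st.2 ++ [(nb, d + 1)]))
      (D, q)
    = ((dslFresh D.keys nbrs).foldl (fun D k => D.insert k (d + 1)) D,
       q ++ (dslFresh D.keys nbrs).map (fun x => (x, d + 1))) := by
  induction nbrs generalizing D q with
  | nil => simp [dslFresh]
  | cons nb t ih =>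
    by_cases hm : nb ∈ D.keys
    · have hc : D.contains nb = true := by
        simp [PySem.Dict.contains_eq_decide_mem_keys, hm]
      simp only [List.foldl_cons, hc, if_true, dslFresh, if_pos hm]
      exact ih D q
    · have hc : D.contains nb = false := by
        simp [PySem.Dict.contains_eq_decide_mem_keys, hm]
      have hk : (D.insert nb (d + 1)).keys = D.keys ++ [nb] := dsl_keys_insert_fresh D nb _ hc
      simp only [List.foldl_cons, hc, Bool.false_eq_true, if_false, dslFresh, if_neg hm]
      rw [ih (D.insert nb (d + 1)) (q ++ [(nb, d + 1)]), hk]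
      simp

theorem dsl_foldB_eq (nbrs : List String) (V : PySem.Set String) (acc : List String) :
    nbrs.foldl
      (fun (st : PySem.Set String × List String) nb =>
        if PySem.Set.contains st.1 nb then st else (PySem.Set.add st.1 nb, st.2 ++ [nb]))
      (V, acc)
    = (V ++ dslFresh V nbrs, acc ++ dslFresh V nbrs) := by
  induction nbrs generalizing V acc with
  | nil => simp [dslFresh]
  | cons nb t ih =>
    by_cases hm : nb ∈ V
    · have hc : PySem.Set.contains V nb = true := (PySem.Set.contains_iff V nb).mpr hm
      simp only [List.foldl_cons, hc, if_true, dslFresh, if_pos hm]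
      exact ih V acc
    · have hc : PySem.Set.contains V nb = false := by
        rcases Bool.eq_false_or_eq_true (PySem.Set.contains V nb) with h | h
        · exact absurd ((PySem.Set.contains_iff V nb).mp h) hm
        · exact h
      have ha : PySem.Set.add V nb = V ++ [nb] := by simp [PySem.Set.add, hm]
      simp only [List.foldl_cons, hc, Bool.false_eq_true, if_false, dslFresh, if_neg hm, ha]
      rw [ih (V ++ [nb]) (acc ++ [nb])]
      simp

theorem dslB_step_eq (g : List (String × List String)) (V : PySem.Set String) (cur : List String) :
    dslB_step g V cur = (V ++ dslLvl g V cur, dslLvl g V cur) := by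
  suffices h : ∀ (cur : List String) (V : PySem.Set String) (acc : List String),
      cur.foldl (fun st node =>
        ((PySem.Dict.mk g).getD node []).foldl
          (fun (st : PySem.Set String × List String) nb =>
            if PySem.Set.contains st.1 nb then st else (PySem.Set.add st.1 nb, st.2 ++ [nb])) st)
        (V, acc)
      = (V ++ dslLvl g V cur, acc ++ dslLvl g V cur) by
    unfold dslB_step
    rw [h cur V []]
    simp
  intro cur
  induction cur with
  | nil => intro V acc; simp [dslLvl]
  | cons n t ih =>
    intro V acc
    simp only [List.foldl_cons]
    rw [dsl_foldB_eq]
    rw [ih]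
    simp [dslLvl, dslAdj, List.append_assoc]

-- ---- dslLvl lemmas ----
theorem dslLvl_mem (g : List (String × List String)) :
    ∀ (cur mem : List String), ∀ x ∈ dslLvl g mem cur, x ∉ mem ∧ x ∈ dslFlat g := by
  intro cur
  induction cur with
  | nil => intro mem x hx; simp [dslLvl] at hx
  | cons n t ih =>
    intro mem x hx
    simp only [dslLvl, List.mem_append] at hx
    rcases hx with hx | hx
    · exact ⟨(dslFresh_mem hx).2, dslAdj_subset g n (dslFresh_mem hx).1⟩
    · have := ih _ x hx
      exact ⟨fun hm => this.1 (by simp [hm]), this.2⟩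

theorem dslLvl_nodup (g : List (String × List String)) :
    ∀ (cur mem : List String), (dslLvl g mem cur).Nodup := by
  intro cur
  induction cur with
  | nil => intro mem; simp [dslLvl]
  | cons n t ih =>
    intro mem
    simp only [dslLvl]
    refine List.Nodup.append (dslFresh_nodup _ _) (ih _) ?_
    intro x hx hx'
    exact (dslLvl_mem g t _ x hx').1 (by simp [hx])

-- ---- counting lemmas for the fuel bounds ----
theorem dsl_countP_split (p q : String → Bool) :
    ∀ u : List String, (∀ x, q x = true → p x = true) →
      u.countP p = u.countP q + u.countP (fun x => p x && !q x) := by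
  intro u hq
  induction u with
  | nil => simp
  | cons a t ih =>
    rcases hqa : q a with _ | _
    · rcases hpa : p a with _ | _
      · simp [hqa, hpa, ih]
      · simp [hqa, hpa, ih]; omega
    · have hpa : p a = true := hq a hqa
      simp [hqa, hpa, ih]; omega

theorem dsl_nodup_sub_length (ws u : List String) (h : ws.Nodup) (hs : ∀ x ∈ ws, x ∈ u) :
    ws.length ≤ u.length := by
  classical
  calc ws.length = ws.toFinset.card := (List.toFinset_card_of_nodup h).symm
  _ ≤ u.toFinset.card := Finset.card_le_card (by
      intro x hx; simp only [List.mem_toFinset] at *; exact hs x hx)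
  _ ≤ u.length := u.toFinset_card_le

theorem dslS_mono (g : List (String × List String)) (anchor : String) (mem ws : List String) :
    dslS g anchor (mem ++ ws) ≤ dslS g anchor mem := by
  unfold dslS
  rw [← List.countP_eq_length_filter, ← List.countP_eq_length_filter]
  apply List.countP_mono_left
  intro x _ hx
  simp only [decide_eq_true_eq, List.mem_append] at *
  exact fun h => hx (Or.inl h)

theorem dslS_drop (g : List (String × List String)) (anchor : String) (mem ws : List String)
    (hnd : ws.Nodup) (hws0 : ∀ x ∈ ws, x ∉ mem ∧ x ∈ dslFlat g) :
    dslS g anchor (mem ++ ws) + ws.length ≤ dslS g anchor mem := by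
  classical
  unfold dslS
  rw [← List.countP_eq_length_filter, ← List.countP_eq_length_filter]
  have hsplit := dsl_countP_split (fun x => decide (x ∉ mem)) (fun x => decide (x ∉ mem ++ ws))
    (dslUni g anchor) (by intro x hx; simp only [decide_eq_true_eq, List.mem_append] at *; exact fun h => hx (Or.inl h))
  beta_reduce at hsplit
  rw [hsplit]
  have hws : ws.length ≤ (dslUni g anchor).countP (fun x => decide (x ∉ mem) && !decide (x ∉ mem ++ ws)) := by
    rw [List.countP_eq_length_filter]
    apply dsl_nodup_sub_length ws _ hnd
    intro w hw
    rw [List.mem_filter]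
    refine ⟨?_, ?_⟩
    · unfold dslUni
      rw [List.mem_dedup]
      exact List.mem_cons_of_mem _ (hws0 w hw).2
    · simp only [Bool.and_eq_true, Bool.not_eq_true', decide_eq_true_eq, decide_eq_false_iff_not, Decidable.not_not]
      exact ⟨(hws0 w hw).1, by simp [List.mem_append, hw]⟩
  omega

theorem dslS_le (g : List (String × List String)) (anchor : String) (mem : List String) :
    dslS g anchor mem ≤ (dslFlat g).length + 1 := by
  unfold dslS
  calc ((dslUni g anchor).filter _).length ≤ (dslUni g anchor).length := List.length_filter_le _ _
  _ ≤ (anchor :: dslFlat g).length := List.Sublist.length_le (List.dedup_sublist _)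
  _ = (dslFlat g).length + 1 := by simp

-- ---- dslFut lemmas ----
theorem dslFut_pop (g : List (String × List String)) (f : Nat) (mem rest nxt : List String) (n : String) :
    dslFut g f mem (n :: rest) nxt
      = dslFut g f (mem ++ dslFresh mem (dslAdj g n)) rest (nxt ++ dslFresh mem (dslAdj g n)) := by
  cases f with
  | zero => rfl
  | succ f =>
    show (if nxt ++ dslLvl g mem (n :: rest) = [] then _ else _) = _
    simp only [dslFut, dslLvl, List.append_assoc]

theorem dslFut_succ (g : List (String × List String)) (anchor : String) :
    ∀ (f : Nat) (mem rest : List String), dslS g anchor mem + 1 ≤ f →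
      dslFut g (f + 1) mem rest [] = dslFut g f mem rest [] := by
  intro f
  induction f with
  | zero => intro mem rest h; omega
  | succ f ih =>
    intro mem rest h
    show (if [] ++ dslLvl g mem rest = [] then _ else _) = (if [] ++ dslLvl g mem rest = [] then _ else _)
    by_cases hl : dslLvl g mem rest = []
    · simp [hl]
    · simp only [List.nil_append, if_neg hl]
      congr 1
      apply ih
      have hd := dslS_drop g anchor mem (dslLvl g mem rest) (dslLvl_nodup g rest mem) (dslLvl_mem g rest mem)
      have : 1 ≤ (dslLvl g mem rest).length := by
        cases hll : dslLvl g mem rest with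
        | nil => exact absurd hll hl
        | cons a t => simp
      omega

theorem dslFut_stable (g : List (String × List String)) (anchor : String)
    (f₁ f₂ : Nat) (mem rest : List String)
    (h₁ : dslS g anchor mem + 1 ≤ f₁) (h₂ : dslS g anchor mem + 1 ≤ f₂) :
    dslFut g f₁ mem rest [] = dslFut g f₂ mem rest [] := by
  have key : ∀ (k f : Nat), dslS g anchor mem + 1 ≤ f →
      dslFut g (f + k) mem rest [] = dslFut g f mem rest [] := by
    intro k
    induction k with
    | zero => intro f _; rfl
    | succ k ih =>
      intro f hf
      have : f + (k + 1) = (f + k) + 1 := by omega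
      rw [this, dslFut_succ g anchor (f + k) mem rest (by omega), ih f hf]
  rcases Nat.le_total f₁ f₂ with h | h
  · obtain ⟨k, rfl⟩ := Nat.le.dest h
    exact (key k f₁ h₁).symm
  · obtain ⟨k, rfl⟩ := Nat.le.dest h
    exact key k f₂ h₂

theorem dslFut_shift (g : List (String × List String)) (anchor : String)
    (f : Nat) (mem nxt : List String) (h : dslS g anchor mem + 2 ≤ f) :
    dslFut g f mem [] nxt = if nxt = [] then [] else nxt :: dslFut g f mem nxt [] := by
  cases f with
  | zero => omega
  | succ f =>
    show (if nxt ++ dslLvl g mem [] = [] then _ else _) = _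
    have hlv : dslLvl g mem [] = [] := rfl
    rw [hlv]
    simp only [List.append_nil]
    by_cases hn : nxt = []
    · simp [hn]
    · simp only [if_neg hn]
      congr 1
      exact dslFut_stable g anchor f (f + 1) mem nxt (by omega) (by omega)

theorem dslFut_not_mem (g : List (String × List String)) :
    ∀ (f : Nat) (mem rest : List String), ∀ x ∈ (dslFut g f mem rest []).flatten, x ∉ mem := by
  intro f
  induction f with
  | zero => intro mem rest x hx; simp [dslFut] at hx
  | succ f ih =>
    intro mem rest x hx
    by_cases hl : dslLvl g mem rest = []
    · simp [dslFut, hl] at hx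
    · simp only [dslFut, List.nil_append, if_neg hl, List.flatten_cons, List.mem_append] at hx
      rcases hx with hx | hx
      · exact (dslLvl_mem g rest mem x hx).1
      · intro hm
        exact ih (mem ++ dslLvl g mem rest) (dslLvl g mem rest) x hx (by simp [hm])

theorem dslIdx_none {x : String} : ∀ {ls : List (List String)}, dslIdx x ls = none ↔ x ∉ ls.flatten := by
  intro ls
  induction ls with
  | nil => simp [dslIdx]
  | cons l t ih =>
    by_cases hl : x ∈ l
    · simp [dslIdx, hl]
    · simp [dslIdx, hl, ih]

theorem dslFut_idx (g : List (String × List String)) :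
    ∀ (f : Nat) (mem rest : List String) (j : Nat) (hj : j < (dslFut g f mem rest []).length)
      (x : String), x ∈ (dslFut g f mem rest [])[j] → dslIdx x (dslFut g f mem rest []) = some j := by
  intro f
  induction f with
  | zero => intro mem rest j hj; simp [dslFut] at hj
  | succ f ih =>
    intro mem rest j hj x hx
    by_cases hl : dslLvl g mem rest = []
    · simp [dslFut, hl] at hj
    · simp only [dslFut, List.nil_append, if_neg hl] at hj hx ⊢
      cases j with
      | zero =>
        simp only [List.getElem_cons_zero] at hx
        simp [dslIdx, hx]
      | succ j =>
        simp only [List.getElem_cons_succ] at hx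
        have hlen : j < (dslFut g f (mem ++ dslLvl g mem rest) (dslLvl g mem rest) []).length := by
          simpa using hj
        have hidx := ih (mem ++ dslLvl g mem rest) (dslLvl g mem rest) j hlen x hx
        have hxm : x ∉ mem ++ dslLvl g mem rest :=
          dslFut_not_mem g f (mem ++ dslLvl g mem rest) (dslLvl g mem rest) x
            (List.mem_flatten.mpr ⟨_, List.getElem_mem hlen, hx⟩)
        have hxl : x ∉ dslLvl g mem rest := fun h => hxm (by simp [h])
        simp [dslIdx, hxl, hidx]

-- ---- characterization of A's loop ----
def dslAP (g : List (String × List String)) (anchor : String) (f : Nat) : Prop :=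
  ∀ (d : Int) (rest nxt : List String) (D : PySem.Dict String Int) (lin res : List String)
    (Dfin : PySem.Dict String Int) (fB : Nat),
    D.keys.Nodup →
    (∀ x ∈ D.keys, x ∈ dslUni g anchor) →
    (∀ x ∈ nxt, D.get? x = some (d + 1)) →
    dslS g anchor D.keys + 2 ≤ fB →
    dslA_loop g f (rest.map (fun x => (x, d)) ++ nxt.map (fun x => (x, d + 1))) D lin = some (res, Dfin) →
    res = lin ++ rest ++ (dslFut g fB D.keys rest nxt).flatten
    ∧ ∀ x, Dfin.get? x = (match dslIdx x (dslFut g fB D.keys rest nxt) with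
        | some i => some (d + 1 + (i : Int))
        | none => D.get? x)

theorem dslA_pop (g : List (String × List String)) (anchor : String) (f : Nat)
    (ih : dslAP g anchor f) (d : Int) (n : String) (rest' nxt : List String)
    (D : PySem.Dict String Int) (lin res : List String) (Dfin : PySem.Dict String Int) (fB : Nat)
    (hnd : D.keys.Nodup) (hkeys : ∀ x ∈ D.keys, x ∈ dslUni g anchor)
    (hnxt : ∀ x ∈ nxt, D.get? x = some (d + 1)) (hfB : dslS g anchor D.keys + 2 ≤ fB)
    (hloop : dslA_loop g (f + 1) ((n :: rest').map (fun x => (x, d)) ++ nxt.map (fun x => (x, d + 1))) D lin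
      = some (res, Dfin)) :
    res = lin ++ (n :: rest') ++ (dslFut g fB D.keys (n :: rest') nxt).flatten
    ∧ ∀ x, Dfin.get? x = (match dslIdx x (dslFut g fB D.keys (n :: rest') nxt) with
        | some i => some (d + 1 + (i : Int))
        | none => D.get? x) := by
  simp only [List.map_cons, List.cons_append, dslA_loop] at hloop
  rw [dsl_foldA_eq] at hloop
  set fr := dslFresh D.keys ((PySem.Dict.mk g).getD n []) with hfrdef
  have hfrA : fr = dslFresh D.keys (dslAdj g n) := rfl
  set D' := fr.foldl (fun D k => D.insert k (d + 1)) D with hD'def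
  have hfr_mem : ∀ x ∈ fr, x ∉ D.keys ∧ x ∈ dslFlat g := by
    intro x hx
    rw [hfrA] at hx
    exact ⟨(dslFresh_mem hx).2, dslAdj_subset g n (dslFresh_mem hx).1⟩
  have hfr_nd : fr.Nodup := hfrA ▸ dslFresh_nodup _ _
  have hkeys' : D'.keys = D.keys ++ fr :=
    dsl_keys_foldl_insert_const fr (d + 1) D (fun x hx => (hfr_mem x hx).1) hfr_nd
  have hget' : ∀ x, D'.get? x = if x ∈ fr then some (d + 1) else D.get? x := fun x =>
    dsl_get?_foldl_insert_const fr (d + 1) D x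
  have hloop' : dslA_loop g f (rest'.map (fun x => (x, d)) ++ (nxt ++ fr).map (fun x => (x, d + 1)))
      D' (lin ++ [n]) = some (res, Dfin) := by
    rw [← hloop]
    congr 1
    simp [List.map_append, List.append_assoc]
  have hpop : dslFut g fB D.keys (n :: rest') nxt = dslFut g fB D'.keys rest' (nxt ++ fr) := by
    rw [hkeys']
    exact dslFut_pop g fB D.keys rest' nxt n
  obtain ⟨hres, hval⟩ := ih d rest' (nxt ++ fr) D' (lin ++ [n]) res Dfin fB
    (by rw [hkeys']
        exact List.Nodup.append hnd hfr_nd (fun x hx hx' => (hfr_mem x hx').1 hx))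
    (by rw [hkeys']
        intro x hx
        rcases List.mem_append.mp hx with h | h
        · exact hkeys x h
        · unfold dslUni
          rw [List.mem_dedup]
          exact List.mem_cons_of_mem _ (hfr_mem x h).2)
    (by intro x hx
        rw [hget' x]
        rcases List.mem_append.mp hx with h | h
        · have hxk : x ∈ D.keys := by
            by_contra hxk
            have := (PySem.Dict.get?_eq_none_iff_not_mem_keys D x).mpr hxk
            rw [hnxt x h] at this
            exact Option.some_ne_none _ this
          rw [if_neg (fun hxf => (hfr_mem x hxf).1 hxk)]
          exact hnxt x h
        · rw [if_pos h])
    (by calc dslS g anchor D'.keys + 2 ≤ dslS g anchor D.keys + 2 := by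
              rw [hkeys']; exact Nat.add_le_add_right (dslS_mono g anchor D.keys fr) 2
          _ ≤ fB := hfB)
    hloop'
  constructor
  · rw [hpop, hres]
    simp
  · intro x
    rw [hpop]
    rw [hval x]
    cases hidx : dslIdx x (dslFut g fB D'.keys rest' (nxt ++ fr)) with
    | some i => rfl
    | none =>
      have hxfl : x ∉ (dslFut g fB D'.keys rest' (nxt ++ fr)).flatten := dslIdx_none.mp hidx
      have hxfr : x ∉ fr := by
        intro hxf
        cases fB with
        | zero => omega
        | succ fB' =>
          rw [dslFut_unfold] at hxfl
          have hnl : (nxt ++ fr) ++ dslLvl g D'.keys rest' ≠ [] := by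
            intro hnl
            have : fr = [] := by
              rcases List.append_eq_nil_iff.mp hnl with ⟨h1, _⟩
              exact (List.append_eq_nil_iff.mp h1).2
            rw [this] at hxf; simp at hxf
          rw [if_neg hnl] at hxfl
          exact hxfl (by simp [hxf])
      simp only [hget' x, if_neg hxfr]

theorem dslA_run (g : List (String × List String)) (anchor : String) : ∀ f, dslAP g anchor f := by
  intro f
  induction f with
  | zero =>
    intro d rest nxt D lin res Dfin fB _ _ _ _ hloop
    exact absurd hloop (by simp [dslA_loop])
  | succ f ih =>
    intro d rest nxt D lin res Dfin fB hnd hkeys hnxt hfB hloop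
    cases rest with
    | cons n rest' =>
      exact dslA_pop g anchor f ih d n rest' nxt D lin res Dfin fB hnd hkeys hnxt hfB hloop
    | nil =>
      cases hn : nxt with
      | nil =>
        subst hn
        simp only [List.map_nil, List.nil_append, dslA_loop, Option.some_inj] at hloop
        have hres : res = lin := (congrArg Prod.fst hloop).symm
        have hDfin : Dfin = D := (congrArg Prod.snd hloop).symm
        have hfut : dslFut g fB D.keys [] [] = [] := by
          cases fB with
          | zero => rfl
          | succ fB' =>
            rw [dslFut_unfold]
            simp [show dslLvl g D.keys [] = [] from rfl]
        rw [hres, hDfin, hfut]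
        exact ⟨by simp, fun x => by simp [dslIdx]⟩
      | cons m nxt' =>
        subst hn
        have hnxt_ne : m :: nxt' ≠ ([] : List String) := by simp
        have hshift := dslFut_shift g anchor fB D.keys (m :: nxt') hfB
        rw [if_neg hnxt_ne] at hshift
        have hloop' : dslA_loop g (f + 1)
            ((m :: nxt').map (fun x => (x, d + 1)) ++ ([] : List String).map (fun x => (x, d + 1 + 1)))
            D lin = some (res, Dfin) := by
          rw [← hloop]
          simp
        obtain ⟨hres, hval⟩ := dslA_pop g anchor f ih (d + 1) m nxt' [] D lin res Dfin fB
          hnd hkeys (by simp) hfB hloop'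
        set T := dslFut g fB D.keys (m :: nxt') [] with hTdef
        have hnxt_keys : ∀ x ∈ m :: nxt', x ∈ D.keys := by
          intro x hx
          by_contra hxk
          have := (PySem.Dict.get?_eq_none_iff_not_mem_keys D x).mpr hxk
          rw [hnxt x hx] at this
          exact Option.some_ne_none _ this
        constructor
        · rw [hshift, hres]
          simp
        · intro x
          rw [hshift, hval x]
          by_cases hxn : x ∈ m :: nxt'
          · have hxT : x ∉ T.flatten :=
              fun hxT => dslFut_not_mem g fB D.keys (m :: nxt') x hxT (hnxt_keys x hxn)
            have hidx : dslIdx x T = none := dslIdx_none.mpr hxT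
            have hidx2 : dslIdx x ((m :: nxt') :: T) = some 0 := by simp [dslIdx, hxn]
            rw [hidx, hidx2]
            simp [hnxt x hxn]
          · have hidx2 : dslIdx x ((m :: nxt') :: T) = (dslIdx x T).map (· + 1) := by
              simp [dslIdx, hxn]
            rw [hidx2]
            cases hidx : dslIdx x T with
            | some i => simp; omega
            | none => simp

theorem dslA_term (g : List (String × List String)) (anchor : String) :
    ∀ (f : Nat) (q : List (String × Int)) (D : PySem.Dict String Int) (lin : List String),
      D.keys.Nodup → (∀ x ∈ D.keys, x ∈ dslUni g anchor) →
      q.length + dslS g anchor D.keys + 1 ≤ f →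
      ∃ res Dfin, dslA_loop g f q D lin = some (res, Dfin) := by
  intro f
  induction f with
  | zero => intro q D lin _ _ hf; omega
  | succ f ih =>
    intro q D lin hnd hkeys hf
    cases q with
    | nil => exact ⟨lin, D, rfl⟩
    | cons p q' =>
      obtain ⟨n, d⟩ := p
      simp only [dslA_loop]
      rw [dsl_foldA_eq]
      set fr := dslFresh D.keys ((PySem.Dict.mk g).getD n []) with hfr
      have hfrA : fr = dslFresh D.keys (dslAdj g n) := rfl
      have hfr_mem : ∀ x ∈ fr, x ∉ D.keys ∧ x ∈ dslFlat g := by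
        intro x hx
        rw [hfrA] at hx
        exact ⟨(dslFresh_mem hx).2, dslAdj_subset g n (dslFresh_mem hx).1⟩
      have hkeys' : (fr.foldl (fun D k => D.insert k (d + 1)) D).keys = D.keys ++ fr :=
        dsl_keys_foldl_insert_const fr (d + 1) D (fun x hx => (hfr_mem x hx).1)
          (hfrA ▸ dslFresh_nodup _ _)
      refine ih _ _ _ ?_ ?_ ?_
      · rw [hkeys']
        exact List.Nodup.append hnd (hfrA ▸ dslFresh_nodup _ _)
          (fun x hx hx' => (hfr_mem x hx').1 hx)
      · rw [hkeys']
        intro x hx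
        rcases List.mem_append.mp hx with h | h
        · exact hkeys x h
        · unfold dslUni
          rw [List.mem_dedup]
          exact List.mem_cons_of_mem _ (hfr_mem x h).2
      · have hdrop := dslS_drop g anchor D.keys fr (hfrA ▸ dslFresh_nodup _ _) hfr_mem
        rw [hkeys']
        simp only [List.length_append, List.length_map, List.length_cons] at *
        omega

-- ---- characterization of B's loop ----
theorem dslB_run (g : List (String × List String)) :
    ∀ (f : Nat) (V : PySem.Set String) (cur : List String) (levels : List (List String)),
      dslB_loop g (f + 1) V cur levels
        = if cur = [] then levels else levels ++ cur :: dslFut g f V cur [] := by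
  intro f
  induction f with
  | zero =>
    intro V cur levels
    by_cases hc : cur = []
    · simp [dslB_loop, hc]
    · simp [dslB_loop, hc, dslFut]
  | succ f ih =>
    intro V cur levels
    by_cases hc : cur = []
    · simp [dslB_loop, hc]
    · have hstep : dslB_loop g (f + 1 + 1) V cur levels
          = dslB_loop g (f + 1) (V ++ dslLvl g V cur) (dslLvl g V cur) (levels ++ [cur]) := by
        show (if cur = [] then _ else _) = _
        rw [if_neg hc, dslB_step_eq]
      rw [hstep, ih, if_neg hc, dslFut_unfold]
      by_cases hl : dslLvl g V cur = []
      · simp [hl]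
      · simp [hl]

-- ---- the stable descending sort of a level-labelled list ----
theorem dsl_insertBy_split (bef : String → String → Bool) (x : String) :
    ∀ (hi lo : List String), (∀ y ∈ hi, bef x y = false) →
      (match lo with | [] => True | z :: _ => bef x z = true) →
      PySem.List.insertBy bef x (hi ++ lo) = hi ++ x :: lo := by
  intro hi
  induction hi with
  | nil =>
    intro lo _ hlo
    cases lo with
    | nil => rfl
    | cons z t => simp [PySem.List.insertBy, hlo]
  | cons y hi' ih =>
    intro lo hhi hlo
    have hy : bef x y = false := hhi y (by simp)
    simp only [List.cons_append, PySem.List.insertBy, hy, Bool.false_eq_true, if_false]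
    rw [ih lo (fun z hz => hhi z (by simp [hz])) hlo]

theorem dsl_sort_blocks (key : String → Int) :
    ∀ (L : List (List String)) (j : Nat) (acc : List String),
      (∀ (i : Nat) (hi : i < L.length), ∀ x ∈ L[i], key x = ((j : Int) + (i : Int))) →
      (∀ y ∈ acc, key y < (j : Int)) →
      L.flatten.foldl (fun a x => PySem.List.insertBy (fun a b => decide (key b < key a)) x a) acc
        = L.reverse.flatten ++ acc := by
  have hlev : ∀ (jI : Int) (l hi lo : List String), (∀ x ∈ l, key x = jI) →
      (∀ y ∈ hi, ¬ key y < jI) → (∀ y ∈ lo, key y < jI) →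
      l.foldl (fun a x => PySem.List.insertBy (fun a b => decide (key b < key a)) x a) (hi ++ lo)
        = hi ++ l ++ lo := by
    intro jI l
    induction l with
    | nil => intro hi lo _ _ _; simp
    | cons x l' ihl =>
      intro hi lo hl hhi hlo
      have hx : key x = jI := hl x (by simp)
      have hins : PySem.List.insertBy (fun a b => decide (key b < key a)) x (hi ++ lo)
          = hi ++ x :: lo := by
        apply dsl_insertBy_split
        · intro y hy
          simp only [decide_eq_false_iff_not, hx]
          exact hhi y hy
        · cases lo with
          | nil => trivial
          | cons z t => simp only [hx]; exact decide_eq_true (hlo z (by simp))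
      simp only [List.foldl_cons, hins]
      have : hi ++ x :: lo = (hi ++ [x]) ++ lo := by simp
      rw [this, ihl (hi ++ [x]) lo (fun y hy => hl y (by simp [hy]))
        (by intro y hy
            rcases List.mem_append.mp hy with h | h
            · exact hhi y h
            · simp only [List.mem_singleton] at h
              subst h; simp [hx])
        hlo]
      simp
  intro L
  induction L with
  | nil => intro j acc _ _; simp
  | cons l t ih =>
    intro j acc h hacc
    simp only [List.flatten_cons, List.foldl_append]
    have h1 := hlev ((j : Int)) l [] acc (fun x hx => by simpa using h 0 (by simp) x (by simpa using hx))
      (by simp) hacc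
    simp only [List.nil_append] at h1
    rw [h1]
    rw [ih (j + 1) (l ++ acc)
      (by intro i hi x hx
          have := h (i + 1) (by simpa using hi) x (by simpa using hx)
          rw [this]; push_cast; ring)
      (by intro y hy
          rcases List.mem_append.mp hy with h' | h'
          · have := h 0 (by simp) y (by simpa using h')
            rw [this]; push_cast; omega
          · have := hacc y h'
            push_cast; omega)]
    simp

theorem dsl_sorted_levels (key : String → Int) (L : List (List String))
    (h : ∀ (i : Nat) (hi : i < L.length), ∀ x ∈ L[i], key x = (i : Int)) :
    PySem.List.sorted L.flatten key true = L.reverse.flatten := by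
  rw [PySem.List.sorted_rev_eq_foldl_insertBy]
  have := dsl_sort_blocks key L 0 [] (by intro i hi x hx; simpa using h i hi x hx) (by simp)
  simpa using this

theorem dsl_foldl_append (ls : List (List String)) :
    ∀ acc : List String, ls.foldl (fun out lvl => out ++ lvl) acc = acc ++ ls.flatten := by
  induction ls with
  | nil => intro acc; simp
  | cons l t ih => intro acc; simp [ih]

-- ===== VERDICT (by name: the statement is the Claim_ definition above) =====
theorem distance_sensitive_linearization_spec : Claim_equal_distance_sensitive_linearization := by
  intro graph anchor _
  unfold Spec_distance_sensitive_linearization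
  set F := dslFuel graph with hFdef
  have hF : F = (dslFlat graph).length + 3 := rfl
  set D0 := PySem.Dict.empty.insert anchor (0 : Int) with hD0def
  have hD0keys : D0.keys = [anchor] := by
    rw [hD0def, dsl_keys_insert_fresh _ _ _ rfl]
    rfl
  have hnd : D0.keys.Nodup := by rw [hD0keys]; simp
  have hkeys : ∀ x ∈ D0.keys, x ∈ dslUni graph anchor := by
    rw [hD0keys]
    intro x hx
    simp only [List.mem_singleton] at hx
    subst hx
    unfold dslUni
    rw [List.mem_dedup]
    simp
  have hSle := dslS_le graph anchor D0.keys
  obtain ⟨res, Dfin, hloop⟩ := dslA_term graph anchor F [(anchor, 0)] D0 [] hnd hkeys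
    (by simp only [List.length_cons, List.length_nil]; omega)
  have hloop' : dslA_loop graph F ([anchor].map (fun x => (x, (0 : Int)))
      ++ ([] : List String).map (fun x => (x, (0 : Int) + 1))) D0 [] = some (res, Dfin) := by
    simpa using hloop
  obtain ⟨hres, hval⟩ := dslA_run graph anchor F 0 [anchor] [] D0 [] res Dfin F hnd hkeys
    (by simp) (by omega) hloop'
  rw [hD0keys] at hres hval
  set L' := dslFut graph F [anchor] [anchor] [] with hL'def
  set L := [anchor] :: L' with hLdef
  have hresL : res = L.flatten := by rw [hres]; rfl
  -- the distance labels are exactly the level indices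
  have hkey : ∀ (i : Nat) (hi : i < L.length), ∀ x ∈ L[i], Dfin.getD x 0 = (i : Int) := by
    intro i hi x hx
    cases i with
    | zero =>
      have hx0 : x = anchor := by simpa [hLdef] using hx
      have hxm : anchor ∉ L'.flatten := fun hf =>
        dslFut_not_mem graph F [anchor] [anchor] anchor hf (by simp)
      have hidx : dslIdx anchor L' = none := dslIdx_none.mpr hxm
      have hv := hval anchor
      rw [hidx] at hv
      rw [hx0]
      unfold PySem.Dict.getD
      rw [hv, hD0def, PySem.Dict.get?_insert_self]
      simp
    | succ j =>
      simp only [hLdef, List.getElem_cons_succ] at hx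
      have hj : j < L'.length := by simpa [hLdef] using hi
      have hidx := dslFut_idx graph F [anchor] [anchor] j hj x hx
      have hv := hval x
      rw [show dslFut graph F [anchor] [anchor] [] = L' from rfl] at hidx
      rw [hidx] at hv
      unfold PySem.Dict.getD
      rw [hv]
      simp only [Option.getD_some]
      push_cast
      ring
  -- A's result is the stable descending sort = the reversed level list
  have hA : distance_sensitive_linearization graph anchor = L.reverse.flatten := by
    unfold distance_sensitive_linearization
    rw [← hFdef, hloop]
    rw [hresL]
    exact dsl_sorted_levels (fun x => Dfin.getD x 0) L hkey
  -- B's levels are the same level list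
  have hV0 : PySem.Set.add PySem.Set.empty anchor = [anchor] := rfl
  have hB : distance_sensitive_linearization_alt graph anchor = L.reverse.flatten := by
    unfold distance_sensitive_linearization_alt
    rw [← hFdef, hV0]
    have hFsucc : F = ((dslFlat graph).length + 2) + 1 := by omega
    rw [hFsucc, dslB_run graph ((dslFlat graph).length + 2) [anchor] [anchor] []]
    rw [if_neg (by simp)]
    have hstab : dslFut graph ((dslFlat graph).length + 2) [anchor] [anchor] []
        = dslFut graph F [anchor] [anchor] [] := by
      apply dslFut_stable graph anchor
      · have := dslS_le graph anchor [anchor]; omega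
      · have := dslS_le graph anchor [anchor]; omega
    rw [hstab, List.nil_append, ← hL'def, ← hLdef]
    rw [dsl_foldl_append]
    simp
  rw [hA, hB]
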